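-- pv_equiv track=rewrite | github.com/pypi-data/pypi-mirror-103 | packages/rtcpxr-collector/rtcpxr_collector-0.1.7-py3-none-any.whl/rtcpxr_collector/sip.py | canon_header
-- ===== SOURCE A (Python) =====
-- def canon_header(s):
--     exception = {'call-id': 'Call-ID', 'cseq': 'CSeq', 'www-authenticate': 'WWW-Authenticate'}
--     short = ['allow-events', 'u', 'call-id', 'i', 'contact', 'm',
--              'content-encoding', 'e', 'content-length', 'l',
--              'content-type', 'c', 'event', 'o', 'from', 'f',
--              'subject', 's', 'supported', 'k', 'to', 't', 'via', 'v']
--     s = s.lower()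
--     return ((len(s) == 1) and s in short and canon_header(short[short.index(s) - 1])) \
--         or (s in exception and exception[s]) or '-'.join([x.capitalize() for x in s.split('-')])
-- ===== SOURCE B (Python) =====
-- _CANON = {
--     'u': 'Allow-Events', 'i': 'Call-ID', 'm': 'Contact',
--     'e': 'Content-Encoding', 'l': 'Content-Length', 'c': 'Content-Type',
--     'o': 'Event', 'f': 'From', 's': 'Subject', 'k': 'Supported',
--     't': 'To', 'v': 'Via',
--     'call-id': 'Call-ID', 'cseq': 'CSeq', 'www-authenticate': 'WWW-Authenticate',
-- }
--
--
-- def canon_header(s):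
--     s = s.lower()
--     return _CANON.get(s) or '-'.join(x.capitalize() for x in s.split('-'))
-- ===== Notes on version B (the rewrite author's own statement) =====
-- stated objective: simpler
-- what changed: Replaced the recursion, the len-1/short-list scan with list.index, and the separate exception branch by a single precomputed lookup table keyed by lowercased name, keeping only the capitalize-join fallback.
import Mathlib
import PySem

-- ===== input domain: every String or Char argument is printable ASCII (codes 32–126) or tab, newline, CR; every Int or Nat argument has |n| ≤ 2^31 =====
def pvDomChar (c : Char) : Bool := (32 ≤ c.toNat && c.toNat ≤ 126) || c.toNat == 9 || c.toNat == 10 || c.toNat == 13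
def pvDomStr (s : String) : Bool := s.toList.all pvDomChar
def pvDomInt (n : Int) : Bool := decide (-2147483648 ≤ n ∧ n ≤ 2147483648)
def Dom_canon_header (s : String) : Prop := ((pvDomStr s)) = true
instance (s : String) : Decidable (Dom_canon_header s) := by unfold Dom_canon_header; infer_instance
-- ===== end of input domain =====

-- B replaces A's recursion + list.index scan + separate exception branch by one precomputed
-- lookup table keyed by the lowercased name (objective: simpler).

-- shared helper: Python's str.capitalize() (first char upper, rest lower) — ported by hand,
-- exact on the ASCII domain (where title-casing a char = upper-casing it); used by both ports
def pyCapitalizeChars : List Char → List Char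
  | [] => []
  | c :: r => PySem.Chars.upperChar c :: PySem.Chars.lower r

-- shared helper: '-'.join([x.capitalize() for x in t.split('-')]) — the identical fallback
-- expression both Python versions contain
def capJoin (t : String) : String :=
  String.ofList (PySem.Chars.join ['-'] ((PySem.Chars.splitOn t.toList ['-']).map pyCapitalizeChars))

-- ===== PORT A =====
def exceptionA : PySem.Dict String String :=
  (((PySem.Dict.empty).insert "call-id" "Call-ID").insert "cseq" "CSeq").insert
    "www-authenticate" "WWW-Authenticate"

def shortA : List String :=
  ["allow-events", "u", "call-id", "i", "contact", "m",
   "content-encoding", "e", "content-length", "l",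
   "content-type", "c", "event", "o", "from", "f",
   "subject", "s", "supported", "k", "to", "t", "via", "v"]

-- Python truthiness of `False`/a string in an `… or …` chain: none/"" are falsy
def pyTruthy : Option String → Option String
  | none => none
  | some v => if v = "" then none else some v

-- fuel makes the self-call structurally recursive; A's recursion depth is ≤ 2
-- (the recursive call receives a multi-character long form), so fuel 2 is never exhausted
def canon_headerAux : Nat → String → String
  | 0, _ => ""
  | Nat.succ fuel, s =>
    let t := PySem.Str.lower s
    let first : Option String :=
      if PySem.Str.len t == 1 && shortA.contains t then
        (PySem.List.index? shortA t).bind fun i =>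
          (PySem.List.pyGet? shortA ((i : Int) - 1)).map (canon_headerAux fuel)
      else none
    match pyTruthy first with
    | some v => v
    | none =>
      match pyTruthy (if exceptionA.contains t then exceptionA.get? t else none) with
      | some v => v
      | none => capJoin t

def canon_header (s : String) : String := canon_headerAux 2 s

-- ===== PORT B =====
def canonTable : PySem.Dict String String :=
  ((((((((((((((((PySem.Dict.empty).insert "u" "Allow-Events").insert "i" "Call-ID").insert
    "m" "Contact").insert "e" "Content-Encoding").insert "l" "Content-Length").insert
    "c" "Content-Type").insert "o" "Event").insert "f" "From").insert "s" "Subject").insert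
    "k" "Supported").insert "t" "To").insert "v" "Via").insert "call-id" "Call-ID").insert
    "cseq" "CSeq").insert "www-authenticate" "WWW-Authenticate")

def canon_header_alt (s : String) : String :=
  let t := PySem.Str.lower s
  match pyTruthy (canonTable.get? t) with
  | some v => v
  | none => capJoin t

-- ===== PRECONDITION & SPEC =====
def Spec_canon_header (s : String) (out : String) : Prop := out = canon_header_alt s
instance (s : String) (out : String) : Decidable (Spec_canon_header s out) := by unfold Spec_canon_header; infer_instance

-- ===== CLAIM (what is proved, stated in full; the proofs are below) =====
def Claim_equal_canon_header : Prop := ∀ (s : String), Dom_canon_header s → Spec_canon_header s (canon_header s)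

-- ===== LEMMAS AND PROOFS =====

-- proof-side views of the two bodies after the common `s.lower()` step
def coreA (t : String) : String :=
  let first : Option String :=
    if PySem.Str.len t == 1 && shortA.contains t then
      (PySem.List.index? shortA t).bind fun i =>
        (PySem.List.pyGet? shortA ((i : Int) - 1)).map (canon_headerAux 1)
    else none
  match pyTruthy first with
  | some v => v
  | none =>
    match pyTruthy (if exceptionA.contains t then exceptionA.get? t else none) with
    | some v => v
    | none => capJoin t

def coreB (t : String) : String :=
  match pyTruthy (canonTable.get? t) with
  | some v => v
  | none => capJoin t

theorem canon_header_eq_coreA (s : String) :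
    canon_header s = coreA (PySem.Str.lower s) := rfl

theorem canon_header_alt_eq_coreB (s : String) :
    canon_header_alt s = coreB (PySem.Str.lower s) := rfl

-- the two cores agree on every string
theorem core_eq (t : String) : coreA t = coreB t := by
  by_cases hmem : t ∈ shortA ∨ t = "cseq" ∨ t = "www-authenticate"
  · rcases hmem with h | rfl | rfl
    · simp only [shortA, List.mem_cons, List.not_mem_nil, or_false] at h
      rcases h with rfl|rfl|rfl|rfl|rfl|rfl|rfl|rfl|rfl|rfl|rfl|rfl|rfl|rfl|rfl|rfl|rfl|rfl|rfl|rfl|rfl|rfl|rfl|rfl|rfl <;> decide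
    · decide
    · decide
  · push Not at hmem
    obtain ⟨hns, hcs, hwa⟩ := hmem
    have ne : ∀ x ∈ shortA, t ≠ x := fun x hx h => hns (h ▸ hx)
    have hne0 : t ≠ "u" := ne "u" (by decide)
    have hne1 : t ≠ "i" := ne "i" (by decide)
    have hne2 : t ≠ "m" := ne "m" (by decide)
    have hne3 : t ≠ "e" := ne "e" (by decide)
    have hne4 : t ≠ "l" := ne "l" (by decide)
    have hne5 : t ≠ "c" := ne "c" (by decide)
    have hne6 : t ≠ "o" := ne "o" (by decide)
    have hne7 : t ≠ "f" := ne "f" (by decide)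
    have hne8 : t ≠ "s" := ne "s" (by decide)
    have hne9 : t ≠ "k" := ne "k" (by decide)
    have hne10 : t ≠ "t" := ne "t" (by decide)
    have hne11 : t ≠ "v" := ne "v" (by decide)
    have hne12 : t ≠ "call-id" := ne "call-id" (by decide)
    simp [coreA, coreB, canonTable, exceptionA, pyTruthy,
      PySem.Dict.get?_insert, PySem.Dict.contains_insert, PySem.Dict.get?_empty,
      PySem.Dict.contains_empty, hns, hne0, hne1, hne2, hne3, hne4, hne5, hne6, hne7, hne8, hne9, hne10, hne11, hne12, hcs, hwa]

-- ===== VERDICT (by name: the statement is the Claim_ definition above) =====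
theorem canon_header_spec : Claim_equal_canon_header := by
  intro s _
  show canon_header s = canon_header_alt s
  rw [canon_header_eq_coreA, canon_header_alt_eq_coreB]
  exact core_eq _
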